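-- pv_equiv track=rewrite | github.com/Clonsha00/mahjong-calculator | major/app.py | _is_pong_pong_hu_strict
-- ===== SOURCE A (Python) =====
-- def _is_pong_pong_hu_strict(counts, open_sets):
--     for s in open_sets:
--         if s['type'] == 'chow': return False
--     invalid_for_set = [1, 2, 5]
--     c_copy = counts[:]
--     for p in range(34):
--         if c_copy[p] >= 2:
--             c_copy[p] -= 2
--             is_valid = True
--             for i in range(34):
--                 if c_copy[i] in invalid_for_set:
--                     is_valid = False; break
--             c_copy[p] += 2
--             if is_valid: return True
--     return False
-- ===== SOURCE B (Python) =====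
-- def _is_pong_pong_hu_strict(counts, open_sets):
--     if any(s['type'] == 'chow' for s in open_sets):
--         return False
--     # indices whose current count can never be part of an all-pung split
--     bad = [i for i in range(34) if counts[i] in (1, 2, 5)]
--     if len(bad) > 1:
--         return False
--     if len(bad) == 1:
--         p = bad[0]
--         return counts[p] >= 2 and counts[p] - 2 not in (1, 2, 5)
--     return any(counts[p] >= 2 and counts[p] - 2 not in (1, 2, 5) for p in range(34))
-- ===== Notes on version B (the rewrite author's own statement) =====
-- stated objective: faster
-- what changed: Replaces A's try-each-pair nested rescan (remove 2 at every p, rescan all 34 counts) with one pass that collects the indices with an invalid count {1,2,5} and a three-way case analysis on how many there are; no copied/mutated counts list.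
import Mathlib
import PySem

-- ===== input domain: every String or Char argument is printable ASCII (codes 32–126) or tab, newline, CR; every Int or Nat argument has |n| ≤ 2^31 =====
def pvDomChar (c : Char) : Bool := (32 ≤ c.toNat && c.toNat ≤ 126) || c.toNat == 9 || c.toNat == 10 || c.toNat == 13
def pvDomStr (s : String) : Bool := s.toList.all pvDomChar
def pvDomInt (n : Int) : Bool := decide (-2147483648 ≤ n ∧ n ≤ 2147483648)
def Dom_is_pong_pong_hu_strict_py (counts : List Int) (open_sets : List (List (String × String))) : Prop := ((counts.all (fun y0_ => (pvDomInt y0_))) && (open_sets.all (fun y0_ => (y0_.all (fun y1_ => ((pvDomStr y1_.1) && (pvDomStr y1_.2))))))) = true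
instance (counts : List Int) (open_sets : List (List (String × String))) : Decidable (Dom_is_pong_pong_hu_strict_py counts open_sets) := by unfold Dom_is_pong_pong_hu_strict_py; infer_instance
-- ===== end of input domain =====

-- B replaces A's try-each-pair nested rescan with one pass collecting the invalid-count
-- indices plus a three-way case analysis (objective: faster by a constant factor).

-- ===== PORT A =====
-- s['type'] is ported as first-match lookup with default "": exact wherever Python does not
-- raise KeyError (missing keys reached before a chow are excluded by Pre_); counts[i] is
-- ported as getD 0: exact when len(counts) ≥ 34 (shorter counts with no chow raise
-- IndexError in Python and are excluded by Pre_).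
def pvTy (s : List (String × String)) : String := (PySem.Dict.mk s).getD "type" ""

def pvAChow : List (List (String × String)) → Bool
  | [] => false
  | s :: rest => if pvTy s == "chow" then true else pvAChow rest

def pvAValid : List Int → List Nat → Bool
  | _, [] => true
  | c, i :: is => if [(1 : Int), 2, 5].contains (c.getD i 0) then false else pvAValid c is

def pvALoop : List Int → List Nat → Bool
  | _, [] => false
  | c, p :: ps =>
    if c.getD p 0 ≥ 2 then
      if pvAValid (c.set p (c.getD p 0 - 2)) (List.range 34) then true else pvALoop c ps
    else pvALoop c ps

def is_pong_pong_hu_strict_py (counts : List Int) (open_sets : List (List (String × String))) : Bool :=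
  if pvAChow open_sets then false else pvALoop counts (List.range 34)

-- ===== PORT B =====
def pvBOk (counts : List Int) (p : Nat) : Bool :=
  decide (counts.getD p 0 ≥ 2) && !([(1 : Int), 2, 5].contains (counts.getD p 0 - 2))

def pvBBad (counts : List Int) : List Nat :=
  (List.range 34).filter (fun i => [(1 : Int), 2, 5].contains (counts.getD i 0))

def is_pong_pong_hu_strict_py_alt (counts : List Int) (open_sets : List (List (String × String))) : Bool :=
  if open_sets.any (fun s => pvTy s == "chow") then false
  else if (pvBBad counts).length > 1 then false
  else if (pvBBad counts).length == 1 then pvBOk counts ((pvBBad counts).headD 0)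
  else (List.range 34).any (fun p => pvBOk counts p)

-- ===== PRECONDITION & SPEC =====
-- Pre_ excludes exactly the inputs where A raises: a KeyError (an open set without a 'type'
-- key reached before any chow set) or an IndexError (len(counts) < 34 with no chow set).
def Pre_is_pong_pong_hu_strict_py (counts : List Int) (open_sets : List (List (String × String))) : Prop :=
  (∀ i < open_sets.length, (PySem.Dict.mk (open_sets.getD i [])).get? "type" = none →
      ∃ j < i, pvTy (open_sets.getD j []) = "chow")
  ∧ (34 ≤ counts.length ∨ ∃ i < open_sets.length, pvTy (open_sets.getD i []) = "chow")
instance (counts : List Int) (open_sets : List (List (String × String))) : Decidable (Pre_is_pong_pong_hu_strict_py counts open_sets) := by unfold Pre_is_pong_pong_hu_strict_py; infer_instance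

def pvWitness_is_pong_pong_hu_strict_py : List Int × (List (List (String × String))) :=
  (List.replicate 34 (0 : Int), [])

def Spec_is_pong_pong_hu_strict_py (counts : List Int) (open_sets : List (List (String × String))) (out : Bool) : Prop := out = is_pong_pong_hu_strict_py_alt counts open_sets
instance (counts : List Int) (open_sets : List (List (String × String))) (out : Bool) : Decidable (Spec_is_pong_pong_hu_strict_py counts open_sets out) := by unfold Spec_is_pong_pong_hu_strict_py; infer_instance

-- ===== CLAIM (what is proved, stated in full; the proofs are below) =====
def Claim_equal_is_pong_pong_hu_strict_py : Prop := ∀ (counts : List Int) (open_sets : List (List (String × String))), Dom_is_pong_pong_hu_strict_py counts open_sets → Pre_is_pong_pong_hu_strict_py counts open_sets → Spec_is_pong_pong_hu_strict_py counts open_sets (is_pong_pong_hu_strict_py counts open_sets)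

-- ===== LEMMAS AND PROOFS =====

def pvBad (x : Int) : Prop := x = 1 ∨ x = 2 ∨ x = 5

lemma pv_contains_iff (x : Int) : ([(1 : Int), 2, 5].contains x = true) ↔ pvBad x := by
  simp [pvBad, List.contains_eq_mem]

lemma pv_chow_eq (l : List (List (String × String))) :
    pvAChow l = l.any (fun s => pvTy s == "chow") := by
  induction l with
  | nil => rfl
  | cons s r ih => cases h : (pvTy s == "chow") <;> simp [pvAChow, h, ih]

lemma pv_valid_eq (c : List Int) (l : List Nat) :
    pvAValid c l = l.all (fun i => !([(1 : Int), 2, 5].contains (c.getD i 0))) := by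
  induction l with
  | nil => rfl
  | cons i is ih =>
    cases h : ([(1 : Int), 2, 5].contains (c.getD i 0)) <;>
      simp [pvAValid, ih]

lemma pv_loop_eq (c : List Int) (l : List Nat) :
    pvALoop c l = l.any (fun p =>
      decide (c.getD p 0 ≥ 2) && pvAValid (c.set p (c.getD p 0 - 2)) (List.range 34)) := by
  induction l with
  | nil => rfl
  | cons p ps ih =>
    simp only [pvALoop, List.any_cons]
    by_cases h : c.getD p 0 ≥ 2
    · rw [if_pos h, decide_eq_true h, Bool.true_and, ih]
      cases hv : pvAValid (c.set p (c.getD p 0 - 2)) (List.range 34)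
      · simp
      · simp
    · rw [if_neg h, decide_eq_false h, Bool.false_and, Bool.false_or, ih]

lemma pv_getD_set (c : List Int) (p i : Nat) (v : Int) (hp : p < c.length) :
    (c.set p v).getD i 0 = if i = p then v else c.getD i 0 := by
  by_cases h : p = i
  · subst h
    rw [List.getD_eq_getElem?_getD, List.getElem?_set, if_pos rfl, if_pos hp, if_pos rfl]
    rfl
  · rw [List.getD_eq_getElem?_getD, List.getElem?_set, if_neg h,
      if_neg (fun hh => h hh.symm), ← List.getD_eq_getElem?_getD]

lemma pv_lt_length (c : List Int) (p : Nat) (h : 2 ≤ c.getD p 0) : p < c.length := by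
  by_contra hl
  rw [List.getD_eq_default _ _ (by omega)] at h
  omega

-- A's pair-removal loop succeeds iff some pair index p works and every other index is clean
lemma pv_A_iff (c : List Int) :
    pvALoop c (List.range 34) = true ↔
      ∃ p, p < 34 ∧ 2 ≤ c.getD p 0 ∧ ¬ pvBad (c.getD p 0 - 2) ∧
        ∀ i, i < 34 → i ≠ p → ¬ pvBad (c.getD i 0) := by
  rw [pv_loop_eq]
  simp only [List.any_eq_true, List.mem_range, Bool.and_eq_true, decide_eq_true_eq,
    pv_valid_eq, List.all_eq_true, Bool.not_eq_true', ge_iff_le]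
  constructor
  · rintro ⟨p, hp, hge, hvalid⟩
    have hlen := pv_lt_length c p hge
    refine ⟨p, hp, hge, ?_, ?_⟩
    · have hthis := hvalid p (by simpa using hp)
      rw [pv_getD_set c p p _ hlen, if_pos rfl] at hthis
      intro hb; rw [(pv_contains_iff _).2 hb] at hthis; simp at hthis
    · intro i hi hne hb
      have hthis := hvalid i (by simpa using hi)
      rw [pv_getD_set c p i _ hlen, if_neg hne] at hthis
      rw [(pv_contains_iff _).2 hb] at hthis; simp at hthis
  · rintro ⟨p, hp, hge, hnb, hall⟩
    have hlen := pv_lt_length c p hge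
    refine ⟨p, hp, hge, ?_⟩
    intro i hi
    rw [pv_getD_set c p i _ hlen]
    by_cases h : i = p
    · rw [if_pos h]
      cases hc : ([(1 : Int), 2, 5].contains (c.getD p 0 - 2))
      · rfl
      · exact absurd ((pv_contains_iff _).1 hc) hnb
    · rw [if_neg h]
      cases hc : ([(1 : Int), 2, 5].contains (c.getD i 0))
      · rfl
      · exact absurd ((pv_contains_iff _).1 hc) (hall i hi h)

lemma pv_ok_iff (c : List Int) (p : Nat) :
    pvBOk c p = true ↔ 2 ≤ c.getD p 0 ∧ ¬ pvBad (c.getD p 0 - 2) := by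
  simp [pvBOk, pvBad, not_or]

lemma pv_mem_bad (c : List Int) (i : Nat) :
    i ∈ pvBBad c ↔ i < 34 ∧ pvBad (c.getD i 0) := by
  simp [pvBBad, pvBad, List.mem_filter, List.mem_range]

lemma pv_bad_nodup (c : List Int) : (pvBBad c).Nodup :=
  (List.nodup_range).filter _

-- B's case analysis succeeds under exactly the same condition
lemma pv_B_iff (c : List Int) :
    (if (pvBBad c).length > 1 then false
     else if (pvBBad c).length == 1 then pvBOk c ((pvBBad c).headD 0)
     else (List.range 34).any (fun p => pvBOk c p)) = true ↔
      ∃ p, p < 34 ∧ 2 ≤ c.getD p 0 ∧ ¬ pvBad (c.getD p 0 - 2) ∧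
        ∀ i, i < 34 → i ≠ p → ¬ pvBad (c.getD i 0) := by
  rcases hbad : pvBBad c with _ | ⟨q, _ | ⟨r, rest⟩⟩
  · -- no bad index
    simp only [List.length_nil, List.headD_nil]
    rw [if_neg (by omega), if_neg (by simp)]
    simp only [List.any_eq_true, List.mem_range]
    constructor
    · rintro ⟨p, hp, hok⟩
      obtain ⟨h1, h2⟩ := (pv_ok_iff c p).1 hok
      refine ⟨p, hp, h1, h2, ?_⟩
      intro i hi _ hb
      have hmem : i ∈ pvBBad c := (pv_mem_bad c i).2 ⟨hi, hb⟩
      rw [hbad] at hmem; simp at hmem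
    · rintro ⟨p, hp, h1, h2, _⟩
      exact ⟨p, hp, (pv_ok_iff c p).2 ⟨h1, h2⟩⟩
  · -- exactly one bad index q
    have hq : q < 34 ∧ pvBad (c.getD q 0) := (pv_mem_bad c q).1 (by rw [hbad]; simp)
    simp only [List.length_cons, List.length_nil, List.headD_cons]
    rw [if_neg (by omega), if_pos (by simp)]
    rw [pv_ok_iff]
    constructor
    · rintro ⟨h1, h2⟩
      refine ⟨q, hq.1, h1, h2, ?_⟩
      intro i hi hne hb
      have hmem : i ∈ pvBBad c := (pv_mem_bad c i).2 ⟨hi, hb⟩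
      rw [hbad] at hmem; simp at hmem; exact hne hmem
    · rintro ⟨p, hp, h1, h2, hall⟩
      by_cases hpq : p = q
      · subst hpq; exact ⟨h1, h2⟩
      · exact absurd hq.2 (hall q hq.1 (fun h => hpq h.symm))
  · -- two or more bad indices: one of them survives any choice of pair index p
    have hqr : q ≠ r := by
      have hnd := pv_bad_nodup c
      rw [hbad] at hnd
      simp only [List.nodup_cons, List.mem_cons] at hnd
      exact fun h => hnd.1 (Or.inl h)
    have hq : q < 34 ∧ pvBad (c.getD q 0) := (pv_mem_bad c q).1 (by rw [hbad]; simp)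
    have hr : r < 34 ∧ pvBad (c.getD r 0) := (pv_mem_bad c r).1 (by rw [hbad]; simp)
    simp only [List.length_cons]
    rw [if_pos (by omega)]
    simp only [Bool.false_eq_true, false_iff]
    rintro ⟨p, _, _, _, hall⟩
    by_cases hpq : q = p
    · exact hall r hr.1 (fun h => hqr (hpq.trans h.symm)) hr.2
    · exact hall q hq.1 hpq hq.2

-- ===== VERDICT (by name: the statement is the Claim_ definition above) =====
theorem is_pong_pong_hu_strict_py_spec : Claim_equal_is_pong_pong_hu_strict_py := by
  intro counts open_sets _dom _pre
  unfold Spec_is_pong_pong_hu_strict_py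
  unfold is_pong_pong_hu_strict_py is_pong_pong_hu_strict_py_alt
  rw [pv_chow_eq]
  cases h : (open_sets.any (fun s => pvTy s == "chow"))
  · simp only [Bool.false_eq_true, if_false]
    rw [Bool.eq_iff_iff, pv_A_iff, ← pv_B_iff]
  · simp
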